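-- pv_equiv track=rewrite | github.com/TanyaChutani/DiabetesAgent | main.py | _remove_rep
-- ===== SOURCE A (Python) =====
-- def _remove_rep(txt):
--     t = txt.split()
--     s = set()
--     o = []
--     i = 0
--     while i < len(t):
--         e = tuple(t[i:i+3])
--         if e in s:
--             i += 3
--             continue
--         s.add(e)
--         o.extend(e)
--         i += 3
--     return " ".join(o)
-- ===== SOURCE B (Python) =====
-- def _remove_rep(txt):
--     t = txt.split()
--     chunks = [tuple(t[i:i + 3]) for i in range(0, len(t), 3)]
--
--     def go(cs):
--         # keep the head chunk, delete every later copy of it, recurse on the rest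
--         if not cs:
--             return []
--         c = cs[0]
--         return list(c) + go([d for d in cs[1:] if d != c])
--
--     return " ".join(go(chunks))
-- ===== Notes on version B (the rewrite author's own statement) =====
-- stated objective: alternative
-- what changed: Instead of a forward scan that carries a seen-set and skips chunks already recorded, B recurses on the chunk list: it keeps the head chunk, deletes all later occurrences of it from the remainder, and recurses, so no auxiliary set or membership test exists at all.
import Mathlib
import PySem

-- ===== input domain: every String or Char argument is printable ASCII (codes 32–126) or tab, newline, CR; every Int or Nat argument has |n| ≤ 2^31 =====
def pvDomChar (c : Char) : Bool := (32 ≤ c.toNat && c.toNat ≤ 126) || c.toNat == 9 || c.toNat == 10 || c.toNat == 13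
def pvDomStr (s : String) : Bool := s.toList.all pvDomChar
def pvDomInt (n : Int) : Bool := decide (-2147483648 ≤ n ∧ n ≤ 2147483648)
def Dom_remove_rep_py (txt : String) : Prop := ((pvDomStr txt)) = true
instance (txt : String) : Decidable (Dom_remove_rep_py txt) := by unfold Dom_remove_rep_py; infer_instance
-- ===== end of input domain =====

-- B deduplicates the 3-word chunks by recursion: keep the head chunk, delete its later
-- copies from the remainder, recurse — no seen-set, no index stepping; an alternative of similar cost.

-- ===== PORT A =====
-- the while-loop: i starts at 0 and only ever grows by 3, so a Nat index is exact;
-- t[i:i+3] for 0 ≤ i is (t.drop i).take 3 (PySem.List.slice_natCast_add)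
def remove_rep_py_loop (t : List String) (i : Nat) (s : PySem.Set (List String))
    (o : List String) : List String :=
  if i < t.length then
    let e := (t.drop i).take 3
    if PySem.Set.contains s e then
      remove_rep_py_loop t (i + 3) s o
    else
      remove_rep_py_loop t (i + 3) (PySem.Set.add s e) (o ++ e)
  else o
termination_by t.length - i

def remove_rep_py (txt : String) : String :=
  let t := PySem.Str.split₀ txt
  PySem.Str.join " " (remove_rep_py_loop t 0 PySem.Set.empty [])

-- ===== PORT B =====
-- the inner recursive helper go: head chunk ++ go (tail with later copies of the head deleted)
def remove_rep_alt_go (cs : List (List String)) : List String :=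
  match cs with
  | [] => []
  | c :: rest => c ++ remove_rep_alt_go (rest.filter (fun d => d ≠ c))
termination_by cs.length
decreasing_by
  simp only [List.length_unattach, List.length_cons]
  exact Nat.lt_succ_of_le ((List.length_filter_le _ _).trans (by simp))

def remove_rep_py_alt (txt : String) : String :=
  let t := PySem.Str.split₀ txt
  let chunks := (PySem.List.pyRange 0 (PySem.List.len t) 3).map
    (fun i => PySem.List.slice t (some i) (some (i + 3)))
  PySem.Str.join " " (remove_rep_alt_go chunks)

-- ===== PRECONDITION & SPEC =====
def Spec_remove_rep_py (txt : String) (out : String) : Prop := out = remove_rep_py_alt txt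
instance (txt : String) (out : String) : Decidable (Spec_remove_rep_py txt out) := by unfold Spec_remove_rep_py; infer_instance

-- ===== CLAIM (what is proved, stated in full; the proofs are below) =====
def Claim_equal_remove_rep_py : Prop := ∀ (txt : String), Dom_remove_rep_py txt → Spec_remove_rep_py txt (remove_rep_py txt)

-- ===== LEMMAS AND PROOFS =====

-- the chunk list A's loop walks through, read off the index recursion
def chunksFrom (t : List String) (i : Nat) : List (List String) :=
  if i < t.length then (t.drop i).take 3 :: chunksFrom t (i + 3) else []
termination_by t.length - i

-- A's loop over the index IS a fold over the chunk list
def procA (cs : List (List String)) (s : PySem.Set (List String))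
    (o : List String) : List String :=
  match cs with
  | [] => o
  | c :: cs =>
    if PySem.Set.contains s c then procA cs s o
    else procA cs (PySem.Set.add s c) (o ++ c)

lemma loop_eq_procA (t : List String) (i : Nat) (s : PySem.Set (List String))
    (o : List String) : remove_rep_py_loop t i s o = procA (chunksFrom t i) s o := by
  fun_induction remove_rep_py_loop t i s o with
  | case1 i s o h e hmem ih =>
      rw [chunksFrom, if_pos h]; simp only [procA, e, hmem, if_pos]; exact ih
  | case2 i s o h e hmem ih =>
      rw [chunksFrom, if_pos h]
      simp only [Bool.not_eq_true] at hmem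
      simp only [procA, e, hmem, Bool.false_eq_true, not_false_eq_true, if_neg]
      exact ih
  | case3 i s o h => rw [chunksFrom, if_neg h]; rfl

lemma procA_closed (cs : List (List String)) (s : PySem.Set (List String))
    (o : List String) :
    procA cs s o =
      o ++ ((PySem.Set.ofList cs).filter
        (fun y => !PySem.Set.contains s y)).flatMap id := by
  induction cs generalizing s o with
  | nil => simp [procA, PySem.Set.ofList]
  | cons c cs ih =>
    rw [PySem.Set.ofList_cons]
    by_cases h : PySem.Set.contains s c = true
    · simp only [procA, h, if_pos, ih]
      congr 1
      simp only [List.filter_cons, h, Bool.not_true, PySem.Set.discard,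
        List.filter_filter]
      refine congrArg _ (List.filter_congr fun y _ => ?_)
      by_cases hy : y = c
      · subst hy; simp [PySem.Set.contains] at h ⊢; simp [h]
      · simp [hy]
    · simp only [procA, h, Bool.false_eq_true, not_false_eq_true, if_neg, ih]
      have hfil : List.filter (fun y => !(PySem.Set.add s c).contains y)
            (PySem.Set.ofList cs)
          = List.filter (fun y => !PySem.Set.contains s y)
              ((PySem.Set.ofList cs).discard c) := by
        simp only [PySem.Set.discard, List.filter_filter]
        have hcs : c ∉ s := by simpa [PySem.Set.contains] using h
        refine List.filter_congr fun y _ => ?_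
        by_cases hy : y = c
        · subst hy
          simp [PySem.Set.mem_add]
        · simp [PySem.Set.add, PySem.Set.contains, hcs, hy]
      have hcs : c ∉ s := by simpa [PySem.Set.contains] using h
      rw [hfil]
      simp [hcs, List.flatMap_cons]

-- count arithmetic behind one step of range(i, n, 3)
lemma pyRange3_cons (i n : Nat) :
    PySem.List.pyRange (i : Int) (n : Int) 3 =
      if i < n then (i : Int) :: PySem.List.pyRange ((i : Int) + 3) (n : Int) 3
      else [] := by
  rw [PySem.List.pyRange_of_pos _ _ (by norm_num),
    PySem.List.pyRange_of_pos _ _ (by norm_num)]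
  by_cases h : i < n
  · rw [if_pos (by exact_mod_cast h), if_pos h]
    have hc : (((n : Int) - i + 3 - 1) / 3).toNat
        = (((n : Int) - (i + 3) + 3 - 1) / 3).toNat + 1 := by omega
    rw [hc]
    by_cases h3 : (i : Int) + 3 < n
    · rw [if_pos h3, List.range_succ_eq_map]
      simp only [List.map_cons, List.map_map]
      refine congrArg₂ _ (by push_cast; ring) ?_
      congr 1
      funext k
      simp
      ring
    · rw [if_neg h3]
      have h0 : (((n : Int) - (i + 3) + 3 - 1) / 3).toNat = 0 := by omega
      rw [h0]
      simp
  · rw [if_neg (by exact_mod_cast h), if_neg h]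
    simp

lemma map_pyRange3_eq_chunksFrom (t : List String) (i : Nat) :
    (PySem.List.pyRange (i : Int) (t.length : Int) 3).map
        (fun j => PySem.List.slice t (some j) (some (j + 3)))
      = chunksFrom t i := by
  fun_induction chunksFrom t i with
  | case1 i h ih =>
      rw [pyRange3_cons, if_pos h, List.map_cons]
      have h3 : ((i : Int) + 3) = ((i + 3 : Nat) : Int) := by push_cast; ring
      rw [h3, ih]
      congr 1
      have := PySem.List.slice_natCast_add t i 3
      simpa using this
  | case2 i h => rw [pyRange3_cons, if_neg h]; rfl

-- deleting all copies of c commutes with first-occurrence dedup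
lemma ofList_filter_ne (cs : List (List String)) (c : List String) :
    PySem.Set.ofList (cs.filter (fun d => d ≠ c))
      = PySem.Set.discard (PySem.Set.ofList cs) c := by
  induction cs with
  | nil => simp [PySem.Set.ofList, PySem.Set.discard]
  | cons a cs ih =>
    by_cases ha : a = c
    · subst ha
      rw [List.filter_cons_of_neg (by simp)]
      rw [ih, PySem.Set.ofList_cons]
      simp [PySem.Set.discard, List.filter_filter]
    · rw [List.filter_cons_of_pos (by simp [ha])]
      rw [PySem.Set.ofList_cons, PySem.Set.ofList_cons, ih]
      simp [PySem.Set.discard, List.filter_filter, ha, Bool.and_comm]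

-- B's recursion produces exactly the flattened first-occurrence dedup
lemma go_eq_flat (cs : List (List String)) :
    remove_rep_alt_go cs = (PySem.Set.ofList cs).flatMap id := by
  fun_induction remove_rep_alt_go cs with
  | case1 => simp [PySem.Set.ofList]
  | case2 c rest ih =>
      have hun : (List.filter (fun x : {x // x ∈ rest} => decide (↑x ≠ c))
            rest.attach).unattach = rest.filter (fun d => decide (d ≠ c)) := by
        have h := congrArg List.unattach
          (List.filter_attach rest (fun d => decide (d ≠ c)))
        rw [h, List.unattach, List.map_map]
        exact List.attach_map_subtype_val _
      rw [hun] at ih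
      rw [ih, ofList_filter_ne, PySem.Set.ofList_cons]
      simp [List.flatMap_cons]

theorem remove_rep_eq (txt : String) : remove_rep_py txt = remove_rep_py_alt txt := by
  simp only [remove_rep_py, remove_rep_py_alt, PySem.List.len_eq]
  have hch := map_pyRange3_eq_chunksFrom (PySem.Str.split₀ txt) 0
  simp only [Nat.cast_zero] at hch
  rw [hch, loop_eq_procA, procA_closed, go_eq_flat]
  simp [PySem.Set.empty, PySem.Set.contains, List.flatMap_def]

-- ===== VERDICT (by name: the statement is the Claim_ definition above) =====
theorem remove_rep_py_spec : Claim_equal_remove_rep_py := by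
  intro txt _
  unfold Spec_remove_rep_py
  exact remove_rep_eq txt
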